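-- pv_equiv track=rewrite | github.com/Kamaleshwaran3012/test1 | surgeon-agent/patch_engine/patch_generator.py | generate_patch
-- ===== SOURCE A (Python) =====
-- def generate_patch(code):
--
--     lines = code.split("\n")
--     patched_lines = []
--
--     for line in lines:
--
--         if "transaction.id" in line:
--             patched_lines.append(
--                 "const id = transaction ? transaction.id : null;"
--             )
--         else:
--             patched_lines.append(line)
--
--     return "\n".join(patched_lines)
-- ===== SOURCE B (Python) =====
-- REPLACEMENT = "const id = transaction ? transaction.id : null;"
--
--
-- def generate_patch(code):
--     # Recursive decomposition: peel off the first line (up to the first "\n"),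
--     # patch it if it mentions transaction.id, and recurse on the remainder.
--     i = code.find("\n")
--     if i == -1:
--         return REPLACEMENT if "transaction.id" in code else code
--     head = code[:i]
--     fixed = REPLACEMENT if "transaction.id" in head else head
--     return fixed + "\n" + generate_patch(code[i + 1:])
-- ===== Notes on version B (the rewrite author's own statement) =====
-- stated objective: simpler
-- what changed: Replaces the split/accumulator-loop/join pipeline by a direct recursion that peels the first line with str.find and slicing and concatenates the patched head onto the recursive result, with no intermediate list of lines.
import Mathlib
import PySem

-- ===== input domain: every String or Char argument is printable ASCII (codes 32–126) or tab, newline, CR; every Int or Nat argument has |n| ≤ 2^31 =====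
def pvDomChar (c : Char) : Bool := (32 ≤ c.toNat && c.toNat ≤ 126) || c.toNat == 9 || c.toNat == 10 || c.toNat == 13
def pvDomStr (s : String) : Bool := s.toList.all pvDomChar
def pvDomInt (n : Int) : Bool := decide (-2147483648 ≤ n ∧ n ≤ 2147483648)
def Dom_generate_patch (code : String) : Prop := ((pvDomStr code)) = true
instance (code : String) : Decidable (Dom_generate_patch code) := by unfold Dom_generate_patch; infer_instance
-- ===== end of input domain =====

-- B replaces A's split/loop/join pipeline by a direct recursion peeling one line at a time (objective: simpler decomposition, same cost).

-- shared string literals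
def pvSub : List Char := "transaction.id".toList
def pvRepl : List Char := "const id = transaction ? transaction.id : null;".toList

-- ===== PORT A =====
def generate_patch (code : String) : String :=
  let lines := PySem.Chars.splitOn code.toList ['\n']
  let patched_lines := lines.foldl (fun acc line =>
    if PySem.Chars.isIn pvSub line then acc ++ [pvRepl] else acc ++ [line]) []
  String.ofList (PySem.Chars.join ['\n'] patched_lines)

-- ===== PORT B =====
-- termination fact for the recursion: a found "\n" lies strictly inside the string
theorem pvFindNL_lt (cs : List Char) (h : ¬ PySem.Chars.find cs ['\n'] = -1) :
    (PySem.Chars.find cs ['\n']).toNat < cs.length := by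
  have h1 := PySem.Chars.neg_one_le_find cs ['\n']
  have h0 : 0 ≤ PySem.Chars.find cs ['\n'] := by omega
  obtain ⟨t, ht⟩ := (PySem.Chars.find_spec h0).1
  have hlen : (List.drop (PySem.Chars.find cs ['\n']).toNat cs).length = 1 + t.length := by
    rw [← ht]; simp [Nat.add_comm]
  have := List.length_drop (l := cs) (i := (PySem.Chars.find cs ['\n']).toNat)
  omega

-- i = code.find("\n") is inlined at its use sites
def generate_patch_alt_go (cs : List Char) : List Char :=
  if h : PySem.Chars.find cs ['\n'] = -1 then
    if PySem.Chars.isIn pvSub cs then pvRepl else cs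
  else
    (if PySem.Chars.isIn pvSub (PySem.List.slice cs none (some (PySem.Chars.find cs ['\n']))) then
      pvRepl
    else
      PySem.List.slice cs none (some (PySem.Chars.find cs ['\n']))) ++
      '\n' :: generate_patch_alt_go (PySem.List.slice cs (some (PySem.Chars.find cs ['\n'] + 1)) none)
termination_by cs.length
decreasing_by
  have h1 := PySem.Chars.neg_one_le_find cs ['\n']
  rw [PySem.List.slice_from cs (by omega)]
  have h2 := pvFindNL_lt cs h
  have h3 := List.length_drop (l := cs) (i := (PySem.Chars.find cs ['\n'] + 1).toNat)
  omega

def generate_patch_alt (code : String) : String :=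
  String.ofList (generate_patch_alt_go code.toList)

-- ===== PRECONDITION & SPEC =====
def Spec_generate_patch (code : String) (out : String) : Prop := out = generate_patch_alt code
instance (code : String) (out : String) : Decidable (Spec_generate_patch code out) := by unfold Spec_generate_patch; infer_instance

-- ===== CLAIM (what is proved, stated in full; the proofs are below) =====
def Claim_equal_generate_patch : Prop := ∀ (code : String), Dom_generate_patch code → Spec_generate_patch code (generate_patch code)

-- ===== LEMMAS AND PROOFS =====

-- the per-line patching function both programs apply
def pvF (line : List Char) : List Char := if PySem.Chars.isIn pvSub line then pvRepl else line

-- structural model of code.split("\n")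
def pvSplitNL : List Char → List (List Char)
  | [] => [[]]
  | c :: rest => if c = '\n' then [] :: pvSplitNL rest else (pvSplitNL rest).modifyHead (c :: ·)

theorem pvSplitNL_ne_nil (l : List Char) : pvSplitNL l ≠ [] := by
  induction l with
  | nil => simp [pvSplitNL]
  | cons c rest ih =>
    simp only [pvSplitNL]
    split
    · simp
    · cases h : pvSplitNL rest with
      | nil => exact absurd h ih
      | cons q qs => simp

theorem pvGo_spec (fuel : Nat) : ∀ (l cur : List Char) (acc : List (List Char)), l.length < fuel →
    PySem.Chars.splitOn.go ['\n'] fuel l cur acc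
      = acc.reverse ++ (pvSplitNL l).modifyHead (cur.reverse ++ ·) := by
  induction fuel with
  | zero => intro l cur acc h; omega
  | succ f ih =>
    intro l cur acc h
    cases l with
    | nil => simp [PySem.Chars.splitOn.go, pvSplitNL]
    | cons c rest =>
      by_cases hc : c = '\n'
      · subst hc
        rw [PySem.Chars.splitOn.go]
        simp only [List.isPrefixOf, Bool.and_true, beq_self_eq_true,
          if_pos, List.length_cons, List.drop_succ_cons, List.length_nil, List.drop_zero]
        rw [ih rest [] _ (by simpa using Nat.lt_of_succ_lt_succ h)]
        simp [pvSplitNL]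
        cases hr : pvSplitNL rest with
        | nil => exact absurd hr (pvSplitNL_ne_nil rest)
        | cons q qs => simp
      · rw [PySem.Chars.splitOn.go]
        have hpre : (['\n'].isPrefixOf (c :: rest)) = false := by
          simp [List.isPrefixOf]; exact fun hh => hc hh.symm
        rw [if_neg (by simp [hpre])]
        rw [ih rest (c :: cur) acc (by simpa using Nat.lt_of_succ_lt_succ h)]
        simp only [pvSplitNL, if_neg hc, List.modifyHead_modifyHead]
        have hfun : (fun x => (c :: cur).reverse ++ x) = ((fun x => cur.reverse ++ x) ∘ fun x => c :: x) := by
          funext x; simp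
        rw [hfun]

theorem pvSplitOn_eq (l : List Char) : PySem.Chars.splitOn l ['\n'] = pvSplitNL l := by
  unfold PySem.Chars.splitOn
  rw [pvGo_spec (l.length + 1) l [] [] (by omega)]
  cases h : pvSplitNL l <;> simp

theorem pvMem_iff_infix (cs : List Char) : '\n' ∈ cs ↔ ['\n'] <:+: cs := by
  constructor
  · intro hm
    obtain ⟨s, t, hst⟩ := List.append_of_mem hm
    exact ⟨s, t, by simp [hst]⟩
  · intro hi; exact hi.subset (by simp)

theorem pvSplitNL_no (l : List Char) (h : '\n' ∉ l) : pvSplitNL l = [l] := by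
  induction l with
  | nil => rfl
  | cons c rest ih =>
    have hc : c ≠ '\n' := by intro hh; exact h (by simp [hh])
    simp only [pvSplitNL, if_neg hc, ih (fun hm => h (List.mem_cons_of_mem _ hm))]
    rfl

theorem pvSplitNL_app (a b : List Char) (h : '\n' ∉ a) :
    pvSplitNL (a ++ '\n' :: b) = a :: pvSplitNL b := by
  induction a with
  | nil => simp [pvSplitNL]
  | cons c rest ih =>
    have hc : c ≠ '\n' := by intro hh; exact h (by simp [hh])
    simp only [List.cons_append, pvSplitNL, if_neg hc,
      ih (fun hm => h (List.mem_cons_of_mem _ hm))]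
    rfl

-- A's value in closed form
theorem pvA_eq (code : String) :
    generate_patch code = String.ofList (PySem.Chars.join ['\n'] ((pvSplitNL code.toList).map pvF)) := by
  unfold generate_patch
  have hfun : (fun (acc : List (List Char)) line =>
      if PySem.Chars.isIn pvSub line then acc ++ [pvRepl] else acc ++ [line])
      = fun acc line => acc ++ [pvF line] := by
    funext acc line
    by_cases hl : PySem.Chars.isIn pvSub line <;> simp [pvF, hl]
  simp only [hfun, PySem.List.foldl_append_singleton_eq_map, List.nil_append, pvSplitOn_eq]

-- B's value in the same closed form
theorem pvB_eq (cs : List Char) :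
    generate_patch_alt_go cs = PySem.Chars.join ['\n'] ((pvSplitNL cs).map pvF) := by
  induction hn : cs.length using Nat.strong_induction_on generalizing cs with
  | _ n ih =>
  subst hn
  rw [generate_patch_alt_go]
  by_cases h : PySem.Chars.find cs ['\n'] = -1
  · rw [dif_pos h]
    have hno : '\n' ∉ cs := by
      intro hm
      exact ((PySem.Chars.find_eq_neg_one_iff cs ['\n']).1 h) ((pvMem_iff_infix cs).1 hm)
    rw [pvSplitNL_no cs hno]
    simp [PySem.Chars.join_singleton, pvF]
  · rw [dif_neg h]
    have h1 := PySem.Chars.neg_one_le_find cs ['\n']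
    have h0 : 0 ≤ PySem.Chars.find cs ['\n'] := by omega
    have hlt := pvFindNL_lt cs h
    set n := (PySem.Chars.find cs ['\n']).toNat with hndef
    -- the character at the found position is '\n'
    obtain ⟨hpre, hmin⟩ := PySem.Chars.find_spec h0
    obtain ⟨t, ht⟩ := hpre
    have h2 : List.drop n cs = cs[n] :: List.drop (n + 1) cs :=
      List.drop_eq_getElem_cons hlt
    rw [h2] at ht
    have h3 : cs[n] = '\n' := by
      have := List.head_eq_of_cons_eq ht
      simpa using this.symm
    have hdrop : List.drop n cs = '\n' :: List.drop (n + 1) cs := by rw [h2, h3]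
    have hsplitcs : cs = List.take n cs ++ '\n' :: List.drop (n + 1) cs := by
      conv_lhs => rw [← List.take_append_drop n cs]
      rw [hdrop]
    have hnotake : '\n' ∉ List.take n cs := by
      intro hm
      obtain ⟨j, hj, hje⟩ := List.getElem_of_mem hm
      have hj' : j < n ∧ j < cs.length := by
        have := hj; simp [List.length_take] at this; omega
      have hcsj : cs[j] = '\n' := by simpa using hje
      apply hmin j hj'.1
      exact ⟨List.drop (j + 1) cs, by rw [List.drop_eq_getElem_cons hj'.2, hcsj]; rfl⟩
    -- rewrite the slices
    rw [PySem.List.slice_to cs h0, PySem.List.slice_from cs (by omega)]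
    have hnp1 : (PySem.Chars.find cs ['\n'] + 1).toNat = n + 1 := by omega
    rw [hnp1]
    -- right-hand side
    conv_rhs => rw [hsplitcs]
    rw [pvSplitNL_app _ _ hnotake]
    have hih := ih (List.drop (n + 1) cs).length (by simp; omega) (List.drop (n + 1) cs) rfl
    cases hr : pvSplitNL (List.drop (n + 1) cs) with
    | nil => exact absurd hr (pvSplitNL_ne_nil _)
    | cons q qs =>
      rw [List.map_cons, List.map_cons, PySem.Chars.join_cons_cons]
      rw [hih, hr, List.map_cons]
      rw [hndef]
      simp [pvF]

-- ===== VERDICT (by name: the statement is the Claim_ definition above) =====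
theorem generate_patch_spec : Claim_equal_generate_patch := by
  intro code _
  unfold Spec_generate_patch
  rw [pvA_eq]
  unfold generate_patch_alt
  rw [pvB_eq]
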